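-- pv_equiv track=rewrite | github.com/AlexeyBudyak/CodeWars | python-kata-6kyu/how-many-cows-do-you-have.py | count_cows
-- ===== SOURCE A (Python) =====
-- def count_cows(n):
--     if n == [] or n == {}: return None
--     cows = [0]
--     for year in range(n):
--         for i in range(len(cows)):
--             cows[i]+=  1
--         num_cows = sum( [cow >= 3 for cow in cows])
--         cows += [0] * num_cows
--     return len(cows)
-- ===== SOURCE B (Python) =====
-- def count_cows(n):
--     # Track counts per age bucket instead of a list of individual cows: O(n) vs O(F(n)).
--     a0, a1, a2, older = 1, 0, 0, 0
--     for _ in range(n):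
--         older += a2
--         a2, a1, a0 = a1, a0, older
--     return a0 + a1 + a2 + older
-- ===== Notes on version B (the rewrite author's own statement) =====
-- stated objective: faster
-- what changed: B replaces A's simulation of every individual cow in an exponentially growing list with a linear recurrence over four age-bucket counters (age 0, 1, 2, >=3).
import Mathlib
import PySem

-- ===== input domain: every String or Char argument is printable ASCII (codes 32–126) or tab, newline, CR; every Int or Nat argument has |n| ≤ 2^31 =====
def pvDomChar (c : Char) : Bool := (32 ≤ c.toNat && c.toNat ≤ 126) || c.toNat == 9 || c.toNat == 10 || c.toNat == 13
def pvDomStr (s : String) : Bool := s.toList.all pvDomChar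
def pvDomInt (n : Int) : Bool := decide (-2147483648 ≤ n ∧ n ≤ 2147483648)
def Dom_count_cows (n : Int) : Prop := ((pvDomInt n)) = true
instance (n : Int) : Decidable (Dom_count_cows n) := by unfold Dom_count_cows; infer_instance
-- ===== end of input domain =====

-- B tracks counts per age bucket (0,1,2,≥3) as a linear recurrence instead of simulating
-- every individual cow in a Fibonacci-like growing list (objective: faster, asymptotic).

-- ===== PORT A =====
-- the body of A's 'for year in range(n)' loop, named for readability
def pvStepA (cows : List Int) : List Int :=
  -- for i in range(len(cows)): cows[i] += 1   (in-place index loop)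
  let cows := (List.range cows.length).foldl (fun cs i => cs.set i (cs.getD i 0 + 1)) cows
  -- num_cows = sum([cow >= 3 for cow in cows])
  let num_cows : Int := (cows.map (fun cow => if (3:Int) ≤ cow then (1:Int) else 0)).sum
  -- cows += [0] * num_cows
  cows ++ List.replicate num_cows.toNat 0

-- 'if n == [] or n == {}: return None' can never fire for an int argument, so it is dropped.
def count_cows (n : Int) : Int :=
  (((PySem.List.pyRange 0 n 1).foldl (fun cows (_year : Int) => pvStepA cows) [0]).length : Int)

-- ===== PORT B =====
-- the body of B's loop: older += a2; a2, a1, a0 = a1, a0, older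
def pvStepB (s : Int × Int × Int × Int) : Int × Int × Int × Int :=
  let older := s.2.2.2 + s.2.2.1
  (older, s.1, s.2.1, older)

def count_cows_alt (n : Int) : Int :=
  let s := (PySem.List.pyRange 0 n 1).foldl (fun s (_ : Int) => pvStepB s) (1, 0, 0, 0)
  s.1 + s.2.1 + s.2.2.1 + s.2.2.2

-- ===== PRECONDITION & SPEC =====
def Spec_count_cows (n : Int) (out : Int) : Prop := out = count_cows_alt n
instance (n : Int) (out : Int) : Decidable (Spec_count_cows n out) := by unfold Spec_count_cows; infer_instance

-- ===== CLAIM (what is proved, stated in full; the proofs are below) =====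
def Claim_equal_count_cows : Prop := ∀ (n : Int), Dom_count_cows n → Spec_count_cows n (count_cows n)

-- ===== LEMMAS AND PROOFS =====

-- a fold whose body ignores the list element is an iterate
theorem pv_foldl_const {α β : Type} (g : β → β) (l : List α) (init : β) :
    l.foldl (fun s _ => g s) init = g^[l.length] init := by
  induction l generalizing init with
  | nil => rfl
  | cons a l ih => simp [List.foldl_cons, Function.iterate_succ_apply, ih]

-- the in-place index loop increments every element
theorem pv_inc_aux (suf pre : List Int) :
    (List.range' pre.length suf.length).foldl (fun cs i => cs.set i (cs.getD i 0 + 1)) (pre ++ suf)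
      = pre ++ suf.map (· + 1) := by
  induction suf generalizing pre with
  | nil => simp
  | cons a suf ih =>
    have h1 : (pre ++ a :: suf).getD pre.length 0 = a := by
      simp [List.getD]
    have h2 : (pre ++ a :: suf).set pre.length (a + 1) = (pre ++ [a + 1]) ++ suf := by
      rw [List.set_append_right _ _ (Nat.le_refl _)]
      simp
    have h3 := ih (pre ++ [a + 1])
    simp only [List.length_cons, List.range'_succ, List.foldl_cons, h1, h2]
    simp only [List.length_append, List.length_singleton] at h3
    simpa using h3

theorem pv_inc (cs : List Int) :
    (List.range cs.length).foldl (fun cs i => cs.set i (cs.getD i 0 + 1)) cs = cs.map (· + 1) := by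
  have := pv_inc_aux cs []
  simpa [List.range_eq_range'] using this

-- the 0/1 sum counts the elements ≥ 3
theorem pv_sum_count (cs : List Int) :
    (cs.map (fun cow => if (3:Int) ≤ cow then (1:Int) else 0)).sum
      = (cs.countP (fun c => decide ((3:Int) ≤ c)) : Int) := by
  induction cs with
  | nil => rfl
  | cons a cs ih =>
    simp only [List.map_cons, List.sum_cons, List.countP_cons, ih]
    by_cases h : (3:Int) ≤ a <;> simp [h] <;> omega

-- counting ≥3 after the global +1: the cows aged 2 join the ≥3 bucket
theorem pv_hc3 (cs : List Int) : (∀ c ∈ cs, 0 ≤ c) →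
    (cs.map (· + 1)).countP (fun c => decide ((3:Int) ≤ c))
      = cs.count 2 + cs.countP (fun c => decide ((3:Int) ≤ c)) := by
  induction cs with
  | nil => intro _; rfl
  | cons a cs ih =>
    intro hnn
    have ha : (0:Int) ≤ a := hnn a (List.mem_cons_self ..)
    have ih' := ih (fun c hc => hnn c (List.mem_cons_of_mem _ hc))
    simp only [List.map_cons, List.countP_cons, List.count_cons, ih']
    by_cases hA : a = 2 <;> by_cases hB : (3:Int) ≤ a + 1 <;> by_cases hC : (3:Int) ≤ a <;>
      simp [hA, hB, hC] <;> omega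

-- invariant relating A's cow list to B's bucket counts
def pvInv (cs : List Int) (q : Int × Int × Int × Int) : Prop :=
  ((cs.count 0 : Int) = q.1) ∧ ((cs.count 1 : Int) = q.2.1) ∧ ((cs.count 2 : Int) = q.2.2.1) ∧
  ((cs.countP (fun c => decide ((3:Int) ≤ c)) : Int) = q.2.2.2) ∧ (∀ c ∈ cs, 0 ≤ c)

-- every cow falls in exactly one age bucket
theorem pv_len (cs : List Int) (h : ∀ c ∈ cs, 0 ≤ c) :
    cs.length = cs.count 0 + cs.count 1 + cs.count 2 + cs.countP (fun c => decide ((3:Int) ≤ c)) := by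
  induction cs with
  | nil => rfl
  | cons a cs ih =>
    have ha : (0:Int) ≤ a := h a (List.mem_cons_self ..)
    have ih' := ih (fun c hc => h c (List.mem_cons_of_mem _ hc))
    simp only [List.length_cons, List.count_cons, List.countP_cons, ih']
    by_cases h0 : a = 0 <;> by_cases h1 : a = 1 <;> by_cases h2 : a = 2 <;>
      by_cases h3 : (3:Int) ≤ a <;> simp [h0, h1, h2, h3] <;> omega

theorem pv_step (cs : List Int) (q : Int × Int × Int × Int) (h : pvInv cs q) :
    pvInv (pvStepA cs) (pvStepB q) := by
  obtain ⟨h0, h1, h2, h3, hnn⟩ := h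
  have hc0 : (cs.map (· + 1)).count 0 = 0 := by
    rw [List.count_eq_zero]
    intro hm
    obtain ⟨c, hc, hce⟩ := List.mem_map.mp hm
    have := hnn c hc; omega
  have hc1 : (cs.map (· + 1)).count 1 = cs.count 0 := by
    simp only [List.count_eq_countP, List.countP_map]
    apply List.countP_congr; intro c _
    simp only [Function.comp_apply, beq_iff_eq]; omega
  have hc2 : (cs.map (· + 1)).count 2 = cs.count 1 := by
    simp only [List.count_eq_countP, List.countP_map]
    apply List.countP_congr; intro c _
    simp only [Function.comp_apply, beq_iff_eq]; omega
  have hc3 := pv_hc3 cs hnn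
  refine ⟨?_, ?_, ?_, ?_, ?_⟩
  · simp only [pvStepA, pvStepB, pv_inc, pv_sum_count, List.count_append, hc0,
      List.count_replicate, hc3]
    simp only [BEq.rfl, if_true, Int.toNat_natCast]
    push_cast
    omega
  · simp only [pvStepA, pvStepB, pv_inc, List.count_append, hc1, List.count_replicate]
    simp [h0]
  · simp only [pvStepA, pvStepB, pv_inc, List.count_append, hc2, List.count_replicate]
    simp [h1]
  · simp only [pvStepA, pvStepB, pv_inc, pv_sum_count, List.countP_append, hc3,
      List.countP_replicate]
    simp only [decide_eq_true_eq]
    rw [if_neg (by omega)]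
    push_cast
    omega
  · intro c hc
    simp only [pvStepA, pv_inc, List.mem_append, List.mem_map, List.mem_replicate] at hc
    rcases hc with ⟨d, hd, rfl⟩ | ⟨_, rfl⟩
    · have := hnn d hd; omega
    · omega

theorem pv_iter (m : Nat) : pvInv (pvStepA^[m] [0]) (pvStepB^[m] (1, 0, 0, 0)) := by
  induction m with
  | zero => refine ⟨by decide, by decide, by decide, by decide, ?_⟩; intro c hc; simp at hc; omega
  | succ m ih =>
    rw [Function.iterate_succ_apply', Function.iterate_succ_apply']
    exact pv_step _ _ ih

-- ===== VERDICT (by name: the statement is the Claim_ definition above) =====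
theorem count_cows_spec : Claim_equal_count_cows := by
  intro n _
  simp only [Spec_count_cows, count_cows, count_cows_alt, pv_foldl_const]
  obtain ⟨h0, h1, h2, h3, hnn⟩ := pv_iter (PySem.List.pyRange 0 n 1).length
  rw [pv_len _ hnn]
  push_cast
  omega
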